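-- pv_equiv track=rewrite | github.com/dougthor42/DougLib | douglib/core.py | nearest_indicies
-- ===== SOURCE A (Python) =====
-- import math
--
-- def nearest_indicies(data, x):
--     """
--     Find the two array positions (indices) around x.
--
--     Parameters
--     ----------
--     data : array-like
--         A sequence of [x1, x2, ... xn] values
--     x : numeric
--         The value to to search for in ``data``
--
--     Returns
--     -------
--     indices : list
--         The indices which surround the value ``x``. See Notes for more
--         information.
--
--
--     Examples
--     --------
--     >>> nearest_indicies([1,4,6,8,10,15], 3)
--     [0, 1]
--     >>> nearest_indicies([1,4,6,8,10,15], 6)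
--     [2]
--     >>> nearest_indicies([1,4,6,8,6,10], 7)     # only returns 1st match
--     [2, 3]
--
--
--     .. seealso::
--
--        :func:`pick_x_at_y`
--
--
--     .. note::
--
--        + Timing: O(n)
--        + If an exact match is found, returns a list of length 1 which contains
--          the index of the element ``x``. Otherwise, returns a list of
--          length 2 containing the two indices that surround ``x``.
--        + If there are more than two possible locations, it only returns
--          the first.
--     """
--     # First find the position of the nearest element.
--     # The nearest element is the one where the Abs(data-x) is at a minimum.
--     differences = []
--     for value in data:
--         differences.append(math.fabs(value - x))
--     minimum = min(differences)
--     i = list(position(differences, minimum))[0]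
--     if data[i] - x > 0:
--         return [i - 1, i]
--     elif data[i] - x < 0:
--         return [i, i + 1]
--     else:
--         return [i]
--
-- def position(array, item):
--     """
--     Emulate Mathematica's ``Position[]`` function as best as possible.
--
--     Only works on 1D arrays.
--
--     Parameters
--     ----------
--     array : sequence
--         The list of items to search through.
--     item : any
--         The item to search for.
--
--     Returns
--     -------
--     indices : generator
--         The a generator for the index(es) of item in array. Returns an
--         empty generator if ``item`` is not found.
--
--     Examples
--     --------
--     >>> list(position([0, 1, 2, 3, 4], 2))
--     [2]
--     >>> list(position(["a", "B", "C", "d"], "d"))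
--     [3]
--     >>> list(position(['1', '1', 'a', 15, 1], '1'))
--     [0, 1]
--
--     .. note::
--
--        Timing: O(1)
--     """
--     return (i for i, x in enumerate(array) if x == item)
-- ===== SOURCE B (Python) =====
-- import math
--
--
-- def nearest_indicies(data, x):
--     best = 0
--     best_diff = math.fabs(data[0] - x)
--     for j, value in enumerate(data):
--         d = math.fabs(value - x)
--         if d < best_diff:
--             best, best_diff = j, d
--     if data[best] - x > 0:
--         return [best - 1, best]
--     elif data[best] - x < 0:
--         return [best, best + 1]
--     else:
--         return [best]
-- ===== Notes on version B (the rewrite author's own statement) =====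
-- stated objective: simpler
-- what changed: Replaces A's three passes (build a differences list, min() over it, a position() generator scan) with one enumerate loop tracking the best index and smallest absolute difference (no intermediate list); the sign branch is unchanged.
import Mathlib
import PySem

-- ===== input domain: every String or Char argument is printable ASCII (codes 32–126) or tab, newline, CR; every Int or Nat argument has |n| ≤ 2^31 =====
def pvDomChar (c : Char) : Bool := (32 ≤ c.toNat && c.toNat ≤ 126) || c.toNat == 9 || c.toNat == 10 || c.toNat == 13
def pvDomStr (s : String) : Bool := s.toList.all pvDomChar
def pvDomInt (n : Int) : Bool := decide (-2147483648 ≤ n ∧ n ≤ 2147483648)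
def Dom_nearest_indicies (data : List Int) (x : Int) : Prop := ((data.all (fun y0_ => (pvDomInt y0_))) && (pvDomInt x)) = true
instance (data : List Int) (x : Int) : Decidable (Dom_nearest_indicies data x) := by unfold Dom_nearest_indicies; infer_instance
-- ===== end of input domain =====

-- B replaces A's three passes (differences list, min(), position() scan) with one
-- argmin-tracking enumerate loop; same sign branch, same return value on nonempty data.


-- ===== PORT A =====
-- math.fabs(value - x) is exact here: |value - x| ≤ 2^32 fits a double, so it is |value - x| on Int.
def nearest_indicies (data : List Int) (x : Int) : List Int :=
  let differences : List Int := data.foldl (fun acc value => acc ++ [|value - x|]) []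
  match PySem.List.min? differences (fun y => y) with
  | none => []        -- min([]) raises ValueError: excluded by Pre_
  | some minimum =>
    match PySem.List.index? differences minimum with
    | none => []      -- unreachable: minimum is a member of differences
    | some i =>
      if PySem.List.pyGetD data (i : Int) 0 - x > 0 then [(i : Int) - 1, (i : Int)]
      else if PySem.List.pyGetD data (i : Int) 0 - x < 0 then [(i : Int), (i : Int) + 1]
      else [(i : Int)]

-- ===== PORT B =====
def nearest_indicies_alt (data : List Int) (x : Int) : List Int :=
  -- data[0] raises IndexError on []: excluded by Pre_
  let init : Int × Int := (0, |PySem.List.pyGetD data 0 0 - x|)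
  let st := (PySem.List.enumerate data 0).foldl
    (fun st jv => let d := |jv.2 - x|; if d < st.2 then (jv.1, d) else st) init
  let best := st.1
  if PySem.List.pyGetD data best 0 - x > 0 then [best - 1, best]
  else if PySem.List.pyGetD data best 0 - x < 0 then [best, best + 1]
  else [best]

-- ===== PRECONDITION & SPEC =====
-- A raises ValueError (min of empty sequence) on data = []; B raises IndexError there.
def Pre_nearest_indicies (data : List Int) (x : Int) : Prop := data ≠ []
instance (data : List Int) (x : Int) : Decidable (Pre_nearest_indicies data x) := by unfold Pre_nearest_indicies; infer_instance
def pvWitness_nearest_indicies : List Int × Int := ([1, 4, 6, 8, 10, 15], 3)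

def Spec_nearest_indicies (data : List Int) (x : Int) (out : List Int) : Prop := out = nearest_indicies_alt data x
instance (data : List Int) (x : Int) (out : List Int) : Decidable (Spec_nearest_indicies data x out) := by unfold Spec_nearest_indicies; infer_instance

-- ===== CLAIM (what is proved, stated in full; the proofs are below) =====
def Claim_equal_nearest_indicies : Prop := ∀ (data : List Int) (x : Int), Dom_nearest_indicies data x → Pre_nearest_indicies data x → Spec_nearest_indicies data x (nearest_indicies data x)

-- ===== LEMMAS AND PROOFS =====

lemma pv_foldl_min_le (l : List Int) : ∀ b : Int, l.foldl min b ≤ b := by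
  induction l with
  | nil => intro b; simp
  | cons a t ih =>
    intro b
    calc (a :: t).foldl min b = t.foldl min (min b a) := by simp
    _ ≤ min b a := ih _
    _ ≤ b := min_le_left _ _

lemma pv_foldl_min_mem (l : List Int) : ∀ b : Int, l.foldl min b = b ∨ l.foldl min b ∈ l := by
  induction l with
  | nil => intro b; simp
  | cons a t ih =>
    intro b
    rw [List.foldl_cons]
    rcases ih (min b a) with h | h
    · by_cases hba : b ≤ a
      · left; rw [h, min_eq_left hba]
      · right; rw [h, min_eq_right (le_of_not_ge hba)]; exact List.mem_cons_self ..
    · right; exact List.mem_cons_of_mem _ h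

-- B's loop characterised: it returns the running minimum of bv and the mapped list,
-- paired with the first index achieving it (offset by the enumerate start s).
lemma pv_loop (x : Int) (l : List Int) : ∀ (s bi bv : Int),
    (PySem.List.enumerate l s).foldl
      (fun st jv => if |jv.2 - x| < st.2 then (jv.1, |jv.2 - x|) else st) (bi, bv)
    = (if (l.map (fun v => |v - x|)).foldl min bv < bv then
         (s + (((PySem.List.index? (l.map (fun v => |v - x|))
                  ((l.map (fun v => |v - x|)).foldl min bv)).getD 0 : Nat) : Int),
          (l.map (fun v => |v - x|)).foldl min bv)
       else (bi, bv)) := by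
  induction l with
  | nil => intro s bi bv; simp [PySem.List.enumerate_nil]
  | cons v t ih =>
    intro s bi bv
    rw [PySem.List.enumerate_cons]
    simp only [List.foldl_cons, List.map_cons]
    by_cases hd : |v - x| < bv
    · simp only [hd, if_true]
      rw [ih (s + 1) s |v - x|]
      have hmle : (t.map (fun v => |v - x|)).foldl min |v - x| ≤ |v - x| := pv_foldl_min_le _ _
      have hbase : min bv |v - x| = |v - x| := min_eq_right hd.le
      simp only [hbase]
      set m := (t.map (fun v => |v - x|)).foldl min |v - x| with hm
      by_cases hlt : m < |v - x|
      · have hne : |v - x| ≠ m := (ne_of_gt hlt)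
        rw [if_pos hlt, if_pos (lt_trans hlt hd)]
        rw [PySem.List.index?_cons_of_ne _ hne]
        have hmem : m ∈ t.map (fun v => |v - x|) := by
          rcases pv_foldl_min_mem (t.map (fun v => |v - x|)) |v - x| with h | h
          · exact absurd h (ne_of_lt hlt)
          · exact h
        obtain ⟨k, hk⟩ := Option.isSome_iff_exists.mp
          ((PySem.List.index?_isSome_iff _ _).mpr hmem)
        rw [PySem.List.index?_eq_idxOf?] at hk
        simp [hk]; omega
      · have hmeq : m = |v - x| := le_antisymm hmle (not_lt.mp hlt)
        rw [if_neg hlt, if_pos (by rw [hmeq]; exact hd)]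
        rw [hmeq, PySem.List.index?_cons_self]
        simp
    · simp only [hd, if_false]
      rw [ih (s + 1) bi bv]
      have hbase : min bv |v - x| = bv := min_eq_left (not_lt.mp hd)
      simp only [hbase]
      set m := (t.map (fun v => |v - x|)).foldl min bv with hm
      by_cases hlt : m < bv
      · have hne : |v - x| ≠ m := by
          intro h; exact hd (h ▸ hlt)
        rw [if_pos hlt, if_pos hlt, PySem.List.index?_cons_of_ne _ hne]
        have hmem : m ∈ t.map (fun v => |v - x|) := by
          rcases pv_foldl_min_mem (t.map (fun v => |v - x|)) bv with h | h
          · exact absurd h (ne_of_lt hlt)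
          · exact h
        obtain ⟨k, hk⟩ := Option.isSome_iff_exists.mp
          ((PySem.List.index?_isSome_iff _ _).mpr hmem)
        rw [PySem.List.index?_eq_idxOf?] at hk
        simp [hk]; omega
      · rw [if_neg hlt, if_neg hlt]

-- ===== VERDICT (by name: the statement is the Claim_ definition above) =====
theorem nearest_indicies_spec : Claim_equal_nearest_indicies := by
  intro data x _ hpre
  unfold Spec_nearest_indicies
  obtain ⟨v0, rest, rfl⟩ : ∃ v0 rest, data = v0 :: rest := by
    cases data with
    | nil => exact absurd rfl hpre
    | cons a t => exact ⟨a, t, rfl⟩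
  unfold nearest_indicies nearest_indicies_alt
  rw [PySem.List.foldl_append_singleton_eq_map]
  simp only [List.nil_append, List.map_cons]
  rw [PySem.List.min?_id_cons]
  rw [pv_loop x (v0 :: rest) 0 0]
  have hget0 : PySem.List.pyGetD (v0 :: rest) 0 0 = v0 := by
    rw [PySem.List.pyGetD_ofNat']; rfl
  simp only [hget0, List.map_cons, List.foldl_cons, min_self]
  set m := (rest.map (fun v => |v - x|)).foldl min |v0 - x| with hm
  have hmem : m ∈ |v0 - x| :: rest.map (fun v => |v - x|) := by
    rcases pv_foldl_min_mem (rest.map (fun v => |v - x|)) |v0 - x| with h | h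
    · rw [hm, h]; exact List.mem_cons_self ..
    · exact List.mem_cons_of_mem _ h
  obtain ⟨k, hk⟩ := Option.isSome_iff_exists.mp
    ((PySem.List.index?_isSome_iff _ _).mpr hmem)
  by_cases hlt : m < |v0 - x|
  · rw [if_pos hlt]
    rw [PySem.List.index?_eq_idxOf?] at hk
    simp [hk]
  · rw [if_neg hlt]
    have hmeq : m = |v0 - x| := le_antisymm (pv_foldl_min_le _ _) (not_lt.mp hlt)
    rw [hmeq]
    have hk0 : List.idxOf? |v0 - x| (|v0 - x| :: rest.map (fun v => |v - x|)) = some 0 := by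
      rw [← PySem.List.index?_eq_idxOf?]; exact PySem.List.index?_cons_self _ _
    simp [hk0]
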